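-- pv_equiv track=rewrite | github.com/SngSdrLcrm/dex-scrapper | scrapper.py | tx_receipt_contains_targets
-- ===== SOURCE A (Python) =====
-- def tx_receipt_contains_targets(tx_receipt, monitored_addrs) -> bool:
--     ''' If transaction receipt has events emitted by monitored contracts '''
--     MONITORED_ADDRESSES = [x.lower() for x in monitored_addrs]
--     outputs = tx_receipt.get('outputs')
--     if not outputs:
--         return False
--
--     for output in outputs:
--         for event in output['events']:
--             if event['address'].lower() in MONITORED_ADDRESSES:
--                 return True
--
--     return False
-- ===== SOURCE B (Python) =====
-- def tx_receipt_contains_targets(tx_receipt, monitored_addrs) -> bool: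
--     ''' If transaction receipt has events emitted by monitored contracts '''
--     outputs = tx_receipt.get('outputs')
--     if not outputs:
--         return False
--     targets = sorted(x.lower() for x in monitored_addrs)
--     addrs = sorted(event['address'].lower()
--                    for output in outputs for event in output['events'])
--     # two-pointer merge over the two sorted lists: intersection test
--     i = j = 0
--     while i < len(targets) and j < len(addrs):
--         if targets[i] < addrs[j]:
--             i += 1
--         elif addrs[j] < targets[i]:
--             j += 1
--         else:
--             return True
--     return False
-- ===== Notes on version B (the rewrite author's own statement) =====
-- stated objective: alternative
-- what changed: Instead of A's nested loop testing each event address against a lowered list, B sorts the lowered monitored addresses and the lowered event addresses and decides intersection with a two-pointer merge scan over the two sorted lists.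
-- outside the precondition, e.g. on tx_receipt_contains_targets({'outputs': [{'events': [{'address': 'A'}]}, {}]}, ['a']): A returns True, B raises KeyError
import Mathlib
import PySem

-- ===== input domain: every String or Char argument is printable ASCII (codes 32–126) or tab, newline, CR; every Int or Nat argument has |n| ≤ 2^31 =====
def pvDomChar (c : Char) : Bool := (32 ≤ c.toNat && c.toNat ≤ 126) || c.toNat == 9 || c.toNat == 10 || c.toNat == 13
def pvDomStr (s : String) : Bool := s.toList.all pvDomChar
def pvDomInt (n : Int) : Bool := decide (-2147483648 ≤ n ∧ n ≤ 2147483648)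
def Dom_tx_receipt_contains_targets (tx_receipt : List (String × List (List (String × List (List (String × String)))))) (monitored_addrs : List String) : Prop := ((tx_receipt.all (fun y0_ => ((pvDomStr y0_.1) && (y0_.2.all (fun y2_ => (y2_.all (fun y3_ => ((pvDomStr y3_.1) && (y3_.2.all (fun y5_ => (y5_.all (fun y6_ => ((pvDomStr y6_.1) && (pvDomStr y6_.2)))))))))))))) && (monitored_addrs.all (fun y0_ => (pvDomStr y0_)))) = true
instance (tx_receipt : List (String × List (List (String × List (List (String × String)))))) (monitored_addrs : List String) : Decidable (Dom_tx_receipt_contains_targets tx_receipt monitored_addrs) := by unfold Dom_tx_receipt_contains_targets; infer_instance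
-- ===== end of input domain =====

-- B replaces A's nested membership scan by sorting both lowered address lists and
-- deciding intersection with a two-pointer merge over the sorted lists (alternative algorithm).

-- ===== PORT A =====
def tx_receipt_contains_targets (tx_receipt : List (String × List (List (String × List (List (String × String)))))) (monitored_addrs : List String) : Bool :=
  let MONITORED := monitored_addrs.map PySem.Str.lower
  match (PySem.Dict.mk tx_receipt).get? "outputs" with
  | none => false
  | some outputs =>
    if outputs.isEmpty then false
    else
      -- nested for-loop with early 'return True' = any/any; key lookups total only under Pre_
      outputs.any (fun output =>
        ((PySem.Dict.mk output).getD "events" []).any (fun event =>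
          MONITORED.contains (PySem.Str.lower ((PySem.Dict.mk event).getD "address" ""))))

-- ===== PORT B =====
-- B's while-loop over indices i, j into the two sorted lists = recursion over their suffixes
def pvMergeIntersects : List String → List String → Bool
  | [], _ => false
  | _ :: _, [] => false
  | a :: as, b :: bs =>
    if a < b then pvMergeIntersects as (b :: bs)
    else if b < a then pvMergeIntersects (a :: as) bs
    else true
termination_by l1 l2 => l1.length + l2.length

def tx_receipt_contains_targets_alt (tx_receipt : List (String × List (List (String × List (List (String × String)))))) (monitored_addrs : List String) : Bool :=
  match (PySem.Dict.mk tx_receipt).get? "outputs" with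
  | none => false
  | some outputs =>
    if outputs.isEmpty then false
    else
      let targets := PySem.List.sorted (monitored_addrs.map PySem.Str.lower) (fun x => x) false
      let addrs := PySem.List.sorted
        (outputs.flatMap (fun output =>
          ((PySem.Dict.mk output).getD "events" []).map (fun event =>
            PySem.Str.lower ((PySem.Dict.mk event).getD "address" "")))) (fun x => x) false
      pvMergeIntersects targets addrs

-- ===== PRECONDITION & SPEC =====
-- Pre_ excludes receipts whose outputs list has an output missing the 'events' key or an event
-- missing the 'address' key: there Python raises KeyError (A may instead return True early when a
-- match precedes the missing key; B, which materializes all addresses first, raises).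
def Pre_tx_receipt_contains_targets (tx_receipt : List (String × List (List (String × List (List (String × String)))))) (monitored_addrs : List String) : Prop :=
  ∀ output ∈ ((PySem.Dict.mk tx_receipt).get? "outputs").getD [],
    ((PySem.Dict.mk output).contains "events" = true) ∧
      ∀ event ∈ (PySem.Dict.mk output).getD "events" [],
        (PySem.Dict.mk event).contains "address" = true
instance (tx_receipt : List (String × List (List (String × List (List (String × String)))))) (monitored_addrs : List String) : Decidable (Pre_tx_receipt_contains_targets tx_receipt monitored_addrs) := by unfold Pre_tx_receipt_contains_targets; infer_instance
def pvWitness_tx_receipt_contains_targets : (List (String × List (List (String × List (List (String × String)))))) × List String :=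
  ([("outputs", [[("events", [[("address", "0xAb")]])]])], ["0xab"])
def Spec_tx_receipt_contains_targets (tx_receipt : List (String × List (List (String × List (List (String × String)))))) (monitored_addrs : List String) (out : Bool) : Prop := out = tx_receipt_contains_targets_alt tx_receipt monitored_addrs
instance (tx_receipt : List (String × List (List (String × List (List (String × String)))))) (monitored_addrs : List String) (out : Bool) : Decidable (Spec_tx_receipt_contains_targets tx_receipt monitored_addrs out) := by unfold Spec_tx_receipt_contains_targets; infer_instance

-- ===== CLAIM (what is proved, stated in full; the proofs are below) =====
def Claim_equal_tx_receipt_contains_targets : Prop := ∀ (tx_receipt : List (String × List (List (String × List (List (String × String)))))) (monitored_addrs : List String), Dom_tx_receipt_contains_targets tx_receipt monitored_addrs → Pre_tx_receipt_contains_targets tx_receipt monitored_addrs → Spec_tx_receipt_contains_targets tx_receipt monitored_addrs (tx_receipt_contains_targets tx_receipt monitored_addrs)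

-- ===== LEMMAS AND PROOFS =====
-- the merge scan on two sorted lists decides whether they share an element
theorem pvMergeIntersects_spec (l1 l2 : List String)
    (h1 : l1.Pairwise (· ≤ ·)) (h2 : l2.Pairwise (· ≤ ·)) :
    pvMergeIntersects l1 l2 = decide (∃ x, x ∈ l1 ∧ x ∈ l2) := by
  induction l1, l2 using pvMergeIntersects.induct with
  | case1 l2 => simp [pvMergeIntersects]
  | case2 a as => simp [pvMergeIntersects]
  | case3 a as b bs hab ih =>
    rw [pvMergeIntersects, if_pos hab, ih (List.Pairwise.of_cons h1) h2]
    congr 1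
    apply propext
    constructor
    · rintro ⟨x, hx1, hx2⟩; exact ⟨x, List.mem_cons_of_mem _ hx1, hx2⟩
    · rintro ⟨x, hx1, hx2⟩
      rcases List.mem_cons.mp hx1 with rfl | hx1
      · rcases List.mem_cons.mp hx2 with rfl | hx2
        · exact absurd hab (lt_irrefl _)
        · exact absurd (lt_of_lt_of_le hab (List.rel_of_pairwise_cons h2 hx2)) (lt_irrefl _)
      · exact ⟨x, hx1, hx2⟩
  | case4 a as b bs hab hba ih =>
    rw [pvMergeIntersects, if_neg hab, if_pos hba, ih h1 h2.tail]
    congr 1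
    apply propext
    constructor
    · rintro ⟨x, hx1, hx2⟩; exact ⟨x, hx1, List.mem_cons_of_mem _ hx2⟩
    · rintro ⟨x, hx1, hx2⟩
      rcases List.mem_cons.mp hx2 with rfl | hx2
      · rcases List.mem_cons.mp hx1 with rfl | hx1
        · exact absurd hba (lt_irrefl _)
        · exact absurd (lt_of_lt_of_le hba (List.rel_of_pairwise_cons h1 hx1)) (lt_irrefl _)
      · exact ⟨x, hx1, hx2⟩
  | case5 a as b bs hab hba =>
    have hba' : b ≤ a := le_of_not_gt hab
    have hab' : a ≤ b := le_of_not_gt hba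
    have : a = b := le_antisymm hab' hba'
    subst this
    simp [pvMergeIntersects]

-- ===== VERDICT (by name: the statement is the Claim_ definition above) =====
theorem tx_receipt_contains_targets_spec : Claim_equal_tx_receipt_contains_targets := by
  intro tx mon _ _
  unfold Spec_tx_receipt_contains_targets tx_receipt_contains_targets tx_receipt_contains_targets_alt
  cases h : (PySem.Dict.mk tx).get? "outputs" with
  | none => rfl
  | some outputs =>
    simp only []
    by_cases he : outputs.isEmpty
    · simp [he]
    · have he' : outputs.isEmpty = false := by simpa using he
      simp only [he', Bool.false_eq_true, if_false]
      rw [pvMergeIntersects_spec _ _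
        (PySem.List.sorted_pairwise (mon.map PySem.Str.lower) (fun x => x))
        (PySem.List.sorted_pairwise
          (outputs.flatMap (fun output =>
            ((PySem.Dict.mk output).getD "events" []).map (fun event =>
              PySem.Str.lower ((PySem.Dict.mk event).getD "address" "")))) (fun x => x))]
      rw [Bool.eq_iff_iff]
      simp only [List.any_eq_true, decide_eq_true_eq, PySem.List.mem_sorted,
        List.mem_flatMap, List.mem_map, List.contains_eq_mem]
      constructor
      · rintro ⟨o, ho, e, he2, hc⟩
        exact ⟨PySem.Str.lower ((PySem.Dict.mk e).getD "address" ""), by simpa using hc,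
          o, ho, e, he2, rfl⟩
      · rintro ⟨x, hx1, o, ho, e, he2, rfl⟩
        exact ⟨o, ho, e, he2, by simpa using hx1⟩
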